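-- pv_equiv track=rewrite | github.com/aryanzandi123/5008 | scripts/pathway_pipeline_v2/stage7_validate_and_commit.py | check_reachability_from_roots
-- ===== SOURCE A (Python) =====
-- from typing import Dict, List, Set, Optional, Any, Tuple
--
-- def check_reachability_from_roots(
--     pathway_ids: Set[int],
--     parent_map: Dict[int, Set[int]],
--     root_ids: Set[int],
-- ) -> Tuple[Set[int], Set[int]]:
--     """
--     Check which pathways can reach root categories.
--
--     Returns (reachable_ids, unreachable_ids).
--     """
--     reachable: Set[int] = set()
--
--     def can_reach_root(pathway_id: int, visited: Set[int] = None) -> bool: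
--         if visited is None:
--             visited = set()
--
--         if pathway_id in reachable:
--             return True
--         if pathway_id in root_ids:
--             reachable.add(pathway_id)
--             return True
--         if pathway_id in visited:
--             return False
--
--         visited.add(pathway_id)
--
--         for parent_id in parent_map.get(pathway_id, set()):
--             if can_reach_root(parent_id, visited):
--                 reachable.add(pathway_id)
--                 return True
--
--         return False
--
--     for pid in pathway_ids:
--         can_reach_root(pid)
--
--     unreachable = pathway_ids - reachable
--     return reachable, unreachable
-- ===== SOURCE B (Python) =====
-- def check_reachability_from_roots(pathway_ids, parent_map, root_ids):
--     """Iterative re-implementation: explicit DFS stack instead of recursion."""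
--     reachable = set()
--     for start in pathway_ids:
--         visited = set()
--         stack = [(start, None)]
--         ret = False
--         while stack:
--             node, rest = stack.pop()
--             if rest is None:
--                 # "calling" node
--                 if node in reachable:
--                     ret = True
--                 elif node in root_ids:
--                     reachable.add(node)
--                     ret = True
--                 elif node in visited:
--                     ret = False
--                 else:
--                     visited.add(node)
--                     stack.append((node, list(parent_map.get(node, ()))))
--                     ret = False
--             else:
--                 # returning into node's parent loop with result `ret`
--                 if ret:
--                     reachable.add(node)
--                 elif rest:
--                     stack.append((node, rest[1:]))
--                     stack.append((rest[0], None))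
--                 else:
--                     ret = False
--     unreachable = pathway_ids - reachable
--     return reachable, unreachable
-- ===== Notes on version B (the rewrite author's own statement) =====
-- stated objective: alternative
-- what changed: Replaces A's recursive nested-closure DFS (can_reach_root calling itself over parents) by an iterative DFS driven by an explicit stack of (node, remaining-parents) frames and a return register, removing recursion entirely.
import Mathlib
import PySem

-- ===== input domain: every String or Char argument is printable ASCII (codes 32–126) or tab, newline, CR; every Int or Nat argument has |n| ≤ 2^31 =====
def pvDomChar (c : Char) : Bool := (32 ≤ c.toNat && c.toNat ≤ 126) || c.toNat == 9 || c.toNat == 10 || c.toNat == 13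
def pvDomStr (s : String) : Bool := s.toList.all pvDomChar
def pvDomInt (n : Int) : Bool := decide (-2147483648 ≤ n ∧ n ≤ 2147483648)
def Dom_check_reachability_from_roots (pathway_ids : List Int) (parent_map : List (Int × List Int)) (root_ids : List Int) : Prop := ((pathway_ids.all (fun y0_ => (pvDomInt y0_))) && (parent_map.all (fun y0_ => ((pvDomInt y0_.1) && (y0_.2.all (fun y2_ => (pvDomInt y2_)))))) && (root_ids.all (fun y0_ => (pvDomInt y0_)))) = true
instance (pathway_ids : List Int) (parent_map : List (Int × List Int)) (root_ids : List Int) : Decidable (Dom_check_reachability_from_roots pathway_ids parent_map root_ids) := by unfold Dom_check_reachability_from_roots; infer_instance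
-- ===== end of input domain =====

-- B replaces A's recursive DFS closure by an explicit-stack iterative DFS; objective: alternative (same return value).

-- number of parent-map keys not yet visited (termination measure of B's machine,
-- and the bound behind A's fuel guard)
def pvUnvisited (parent_map : List (Int × List Int)) (vis : PySem.Set Int) : Nat :=
  ((parent_map.map Prod.fst).filter (fun x => !(PySem.Set.contains vis x))).length

theorem pvGetD_mk_eq_nil (parent_map : List (Int × List Int)) (pid : Int)
    (h : pid ∉ parent_map.map Prod.fst) :
    (PySem.Dict.mk parent_map).getD pid [] = [] := by
  induction parent_map with
  | nil => rfl
  | cons hd tl ih =>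
    obtain ⟨k, v⟩ := hd
    simp only [List.map_cons, List.mem_cons, not_or] at h
    simp only [PySem.Dict.getD, PySem.Dict.get?_mk_cons] at *
    have hne : ¬ ((k == pid) = true) := by
      simp only [beq_iff_eq]
      exact fun hh => h.1 hh.symm
    rw [if_neg hne]
    exact ih h.2

theorem pvContains_add (vis : PySem.Set Int) (a x : Int) :
    PySem.Set.contains (PySem.Set.add vis a) x = true ↔
      (PySem.Set.contains vis x = true ∨ x = a) := by
  simp [PySem.Set.mem_add]

theorem pvLength_filter_le {α : Type} (l : List α) (p q : α → Bool)
    (himp : ∀ x, q x = true → p x = true) :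
    (l.filter q).length ≤ (l.filter p).length :=
  List.Sublist.length_le (List.monotone_filter_right l (fun x hx => himp x hx))

theorem pvLength_filter_lt {α : Type} (l : List α) (p q : α → Bool)
    (himp : ∀ x, q x = true → p x = true) (a : α) (ha : a ∈ l)
    (hpa : p a = true) (hqa : q a = false) :
    (l.filter q).length < (l.filter p).length := by
  induction l with
  | nil => cases ha
  | cons b t ih =>
    rw [List.filter_cons, List.filter_cons]
    rcases List.mem_cons.1 ha with rfl | hmem
    · rw [hqa, hpa]
      simpa using Nat.lt_succ_of_le (pvLength_filter_le t p q himp)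
    · cases hq : q b <;> cases hp : p b
      · simpa using ih hmem
      · simp only [Bool.false_eq_true, if_false, if_true, List.length_cons]
        exact Nat.lt_succ_of_lt (ih hmem)
      · exact absurd (himp b hq) (by simp [hp])
      · simp only [if_true, List.length_cons]
        exact Nat.add_lt_add_right (ih hmem) 1

theorem pvUnvisited_add_lt (parent_map : List (Int × List Int)) (vis : PySem.Set Int) (pid : Int)
    (hmem : pid ∈ parent_map.map Prod.fst) (hvis : ¬ PySem.Set.contains vis pid = true) :
    pvUnvisited parent_map (PySem.Set.add vis pid) < pvUnvisited parent_map vis := by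
  refine pvLength_filter_lt _ _ _ ?_ pid hmem (by simpa using hvis) ?_
  · intro x hx
    simp only [Bool.not_eq_true'] at hx ⊢
    by_contra hc
    simp only [Bool.not_eq_false] at hc
    rw [(pvContains_add vis pid x).2 (Or.inl hc)] at hx
    cases hx
  · simpa using (pvContains_add vis pid pid).2 (Or.inr rfl)

theorem pvUnvisited_add_eq (parent_map : List (Int × List Int)) (vis : PySem.Set Int) (pid : Int)
    (hmem : pid ∉ parent_map.map Prod.fst) :
    pvUnvisited parent_map (PySem.Set.add vis pid) = pvUnvisited parent_map vis := by
  unfold pvUnvisited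
  rw [List.filter_congr]
  intro x hx
  have hne : x ≠ pid := fun h => hmem (h ▸ hx)
  cases hc : PySem.Set.contains vis x
  · have : PySem.Set.contains (PySem.Set.add vis pid) x = false := by
      by_contra hcc
      simp only [Bool.not_eq_false] at hcc
      rcases (pvContains_add vis pid x).1 hcc with h | h
      · rw [h] at hc; cases hc
      · exact hne h
    rw [this]
  · rw [(pvContains_add vis pid x).2 (Or.inl hc)]

-- ===== PORT A =====
-- can_reach_root: state-passing transliteration of A's recursive closure
-- (`visited`/`reachable` are threaded through, the for-loop over parents is
-- pvParentLoop; the fuel is only a totality guard — len(parent_map)+1 always suffices,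
-- because each recursion level visits a fresh parent-map key).
mutual
def pvCanReach (parent_map : List (Int × List Int)) (root_ids : List Int) :
    Nat → Int → PySem.Set Int → PySem.Set Int → Bool × PySem.Set Int × PySem.Set Int
  | 0, _, vis, reach => (false, vis, reach)
  | fuel + 1, pid, vis, reach =>
    if PySem.Set.contains reach pid then (true, vis, reach)
    else if PySem.Set.contains root_ids pid then (true, vis, PySem.Set.add reach pid)
    else if PySem.Set.contains vis pid then (false, vis, reach)
    else pvParentLoop parent_map root_ids fuel ((PySem.Dict.mk parent_map).getD pid [])
          pid (PySem.Set.add vis pid) reach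
  termination_by fuel _ _ _ => (fuel, 0)

def pvParentLoop (parent_map : List (Int × List Int)) (root_ids : List Int) :
    Nat → List Int → Int → PySem.Set Int → PySem.Set Int → Bool × PySem.Set Int × PySem.Set Int
  | _, [], _, vis, reach => (false, vis, reach)
  | fuel, p :: ps, pid, vis, reach =>
    match pvCanReach parent_map root_ids fuel p vis reach with
    | (true, v, r) => (true, v, PySem.Set.add r pid)
    | (false, v, r) => pvParentLoop parent_map root_ids fuel ps pid v r
  termination_by fuel parents _ _ _ => (fuel, parents.length + 1)
end

def check_reachability_from_roots (pathway_ids : List Int) (parent_map : List (Int × List Int)) (root_ids : List Int) : List Int × List Int :=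
  let reach := pathway_ids.foldl
    (fun reach pid =>
      (pvCanReach parent_map root_ids (parent_map.length + 1) pid PySem.Set.empty reach).2.2)
    PySem.Set.empty
  (reach, PySem.Set.diff pathway_ids reach)

-- ===== PORT B =====
-- explicit-stack DFS machine (Source B's while loop): a frame (node, none) means
-- "call node", (node, some rest) is node's parent loop with parents rest left;
-- ret carries the most recent call's result.
def pvWeight (fr : Int × Option (List Int)) : Nat :=
  match fr with
  | (_, none) => 2
  | (_, some rest) => 1 + 3 * rest.length

def pvWeights (stk : List (Int × Option (List Int))) : Nat := (stk.map pvWeight).sum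

def pvMach (parent_map : List (Int × List Int)) (root_ids : List Int)
    (stk : List (Int × Option (List Int))) (ret : Bool) (vis reach : PySem.Set Int) :
    Bool × PySem.Set Int × PySem.Set Int :=
  match stk with
  | [] => (ret, vis, reach)
  | (node, none) :: stk' =>
    if PySem.Set.contains reach node then pvMach parent_map root_ids stk' true vis reach
    else if PySem.Set.contains root_ids node then
      pvMach parent_map root_ids stk' true vis (PySem.Set.add reach node)
    else if PySem.Set.contains vis node then pvMach parent_map root_ids stk' false vis reach
    else
      pvMach parent_map root_ids
        ((node, some ((PySem.Dict.mk parent_map).getD node [])) :: stk') false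
        (PySem.Set.add vis node) reach
  | (node, some rest) :: stk' =>
    if ret then pvMach parent_map root_ids stk' true vis (PySem.Set.add reach node)
    else
      match rest with
      | [] => pvMach parent_map root_ids stk' false vis reach
      | p :: ps =>
        pvMach parent_map root_ids ((p, none) :: (node, some ps) :: stk') ret vis reach
termination_by (pvUnvisited parent_map vis, pvWeights stk)
decreasing_by
  · exact Prod.Lex.right _ (by simp [pvWeights, pvWeight]; try omega)
  · exact Prod.Lex.right _ (by simp [pvWeights, pvWeight]; try omega)
  · exact Prod.Lex.right _ (by simp [pvWeights, pvWeight]; try omega)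
  · by_cases hmem : node ∈ parent_map.map Prod.fst
    · exact Prod.Lex.left _ _ (pvUnvisited_add_lt _ _ _ hmem (by assumption))
    · rw [pvUnvisited_add_eq _ _ _ hmem]
      refine Prod.Lex.right _ ?_
      rw [pvGetD_mk_eq_nil _ _ hmem]
      simp [pvWeights, pvWeight]
  · exact Prod.Lex.right _ (by simp [pvWeights, pvWeight]; try omega)
  · exact Prod.Lex.right _ (by simp [pvWeights, pvWeight]; try omega)
  · exact Prod.Lex.right _ (by simp [pvWeights, pvWeight]; try omega)

def check_reachability_from_roots_alt (pathway_ids : List Int) (parent_map : List (Int × List Int)) (root_ids : List Int) : List Int × List Int :=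
  let reach := pathway_ids.foldl
    (fun reach start =>
      (pvMach parent_map root_ids [(start, none)] false PySem.Set.empty reach).2.2)
    PySem.Set.empty
  (reach, PySem.Set.diff pathway_ids reach)

-- ===== PRECONDITION & SPEC =====
def Spec_check_reachability_from_roots (pathway_ids : List Int) (parent_map : List (Int × List Int)) (root_ids : List Int) (out : List Int × List Int) : Prop := out = check_reachability_from_roots_alt pathway_ids parent_map root_ids
instance (pathway_ids : List Int) (parent_map : List (Int × List Int)) (root_ids : List Int) (out : List Int × List Int) : Decidable (Spec_check_reachability_from_roots pathway_ids parent_map root_ids out) := by unfold Spec_check_reachability_from_roots; infer_instance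

-- ===== CLAIM (what is proved, stated in full; the proofs are below) =====
def Claim_equal_check_reachability_from_roots : Prop := ∀ (pathway_ids : List Int) (parent_map : List (Int × List Int)) (root_ids : List Int), Dom_check_reachability_from_roots pathway_ids parent_map root_ids → Spec_check_reachability_from_roots pathway_ids parent_map root_ids (check_reachability_from_roots pathway_ids parent_map root_ids)

-- ===== LEMMAS AND PROOFS =====

-- one-step equations for the machine (proof-side restatements of pvMach's equations)
theorem pvMach_nil (parent_map : List (Int × List Int)) (root_ids : List Int)
    (ret : Bool) (vis reach : PySem.Set Int) :
    pvMach parent_map root_ids [] ret vis reach = (ret, vis, reach) := by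
  rw [pvMach.eq_def]

theorem pvMach_none (parent_map : List (Int × List Int)) (root_ids : List Int)
    (node : Int) (stk : List (Int × Option (List Int))) (ret : Bool) (vis reach : PySem.Set Int) :
    pvMach parent_map root_ids ((node, none) :: stk) ret vis reach =
      (if PySem.Set.contains reach node then pvMach parent_map root_ids stk true vis reach
       else if PySem.Set.contains root_ids node then
         pvMach parent_map root_ids stk true vis (PySem.Set.add reach node)
       else if PySem.Set.contains vis node then pvMach parent_map root_ids stk false vis reach
       else
         pvMach parent_map root_ids
           ((node, some ((PySem.Dict.mk parent_map).getD node [])) :: stk) false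
           (PySem.Set.add vis node) reach) := by
  rw [pvMach.eq_def]

theorem pvMach_some (parent_map : List (Int × List Int)) (root_ids : List Int)
    (node : Int) (rest : List Int) (stk : List (Int × Option (List Int)))
    (ret : Bool) (vis reach : PySem.Set Int) :
    pvMach parent_map root_ids ((node, some rest) :: stk) ret vis reach =
      (if ret then pvMach parent_map root_ids stk true vis (PySem.Set.add reach node)
       else
         match rest with
         | [] => pvMach parent_map root_ids stk false vis reach
         | p :: ps =>
           pvMach parent_map root_ids ((p, none) :: (node, some ps) :: stk) ret vis reach) := by
  rw [pvMach.eq_def]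

-- the recursion only ever grows `visited`
theorem pvParentLoop_vis_mono_aux (parent_map : List (Int × List Int)) (root_ids : List Int)
    (fuel : Nat)
    (hP : ∀ pid vis reach x, PySem.Set.contains vis x = true →
      PySem.Set.contains (pvCanReach parent_map root_ids fuel pid vis reach).2.1 x = true) :
    ∀ (parents : List Int) (pid : Int) (vis reach : PySem.Set Int) (x : Int),
      PySem.Set.contains vis x = true →
      PySem.Set.contains (pvParentLoop parent_map root_ids fuel parents pid vis reach).2.1 x = true := by
  intro parents
  induction parents with
  | nil =>
    intro pid vis reach x hx
    simpa [pvParentLoop] using hx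
  | cons p ps ih =>
    intro pid vis reach x hx
    rw [pvParentLoop]
    have hcall := hP p vis reach x hx
    rcases hres : pvCanReach parent_map root_ids fuel p vis reach with ⟨b, v, r⟩
    rw [hres] at hcall
    cases b
    · exact ih pid v r x hcall
    · exact hcall

theorem pvCanReach_vis_mono (parent_map : List (Int × List Int)) (root_ids : List Int)
    (fuel : Nat) :
    ∀ (pid : Int) (vis reach : PySem.Set Int) (x : Int),
      PySem.Set.contains vis x = true →
      PySem.Set.contains (pvCanReach parent_map root_ids fuel pid vis reach).2.1 x = true := by
  induction fuel with
  | zero =>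
    intro pid vis reach x hx
    simpa [pvCanReach] using hx
  | succ f ihf =>
    intro pid vis reach x hx
    rw [pvCanReach]
    split_ifs with h1 h2 h3
    · exact hx
    · exact hx
    · exact hx
    · exact pvParentLoop_vis_mono_aux parent_map root_ids f ihf _ pid _ reach x
        ((pvContains_add vis pid x).2 (Or.inl hx))

theorem pvUnvisited_mono (parent_map : List (Int × List Int)) (vis vis' : PySem.Set Int)
    (h : ∀ y, PySem.Set.contains vis y = true → PySem.Set.contains vis' y = true) :
    pvUnvisited parent_map vis' ≤ pvUnvisited parent_map vis := by
  refine pvLength_filter_le _ _ _ ?_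
  intro y hy
  simp only [Bool.not_eq_true'] at hy ⊢
  by_contra hc
  simp only [Bool.not_eq_false] at hc
  rw [h y hc] at hy
  cases hy

theorem pvUnvisited_empty_le (parent_map : List (Int × List Int)) :
    pvUnvisited parent_map PySem.Set.empty ≤ parent_map.length := by
  calc pvUnvisited parent_map PySem.Set.empty
      ≤ (parent_map.map Prod.fst).length := List.length_filter_le _ _
    _ = parent_map.length := List.length_map ..

-- simulation: the machine with a call frame on top = the recursive call, then
-- continuing with its (result, visited, reachable) — given sufficient fuel
theorem pvMach_sim_loop_aux (parent_map : List (Int × List Int)) (root_ids : List Int)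
    (fuel : Nat)
    (hS : ∀ (pid : Int) (vis reach : PySem.Set Int) (stk : List (Int × Option (List Int)))
      (ret : Bool), pvUnvisited parent_map vis < fuel →
      pvMach parent_map root_ids ((pid, none) :: stk) ret vis reach =
        pvMach parent_map root_ids stk
          (pvCanReach parent_map root_ids fuel pid vis reach).1
          (pvCanReach parent_map root_ids fuel pid vis reach).2.1
          (pvCanReach parent_map root_ids fuel pid vis reach).2.2) :
    ∀ (parents : List Int) (pid : Int) (vis reach : PySem.Set Int)
      (stk : List (Int × Option (List Int))),
      (pvUnvisited parent_map vis < fuel ∨ parents = []) →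
      pvMach parent_map root_ids ((pid, some parents) :: stk) false vis reach =
        pvMach parent_map root_ids stk
          (pvParentLoop parent_map root_ids fuel parents pid vis reach).1
          (pvParentLoop parent_map root_ids fuel parents pid vis reach).2.1
          (pvParentLoop parent_map root_ids fuel parents pid vis reach).2.2 := by
  intro parents
  induction parents with
  | nil =>
    intro pid vis reach stk _
    rw [pvParentLoop, pvMach_some]
    simp
  | cons p ps ih =>
    intro pid vis reach stk hfuel
    have hf : pvUnvisited parent_map vis < fuel := by
      rcases hfuel with h | h
      · exact h
      · cases h
    have hstep : pvMach parent_map root_ids ((pid, some (p :: ps)) :: stk) false vis reach =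
        pvMach parent_map root_ids ((p, none) :: (pid, some ps) :: stk) false vis reach := by
      rw [pvMach_some]
      simp
    rw [pvParentLoop, hstep, hS p vis reach _ false hf]
    have hmono := pvCanReach_vis_mono parent_map root_ids fuel p vis reach
    rcases hres : pvCanReach parent_map root_ids fuel p vis reach with ⟨b, v, r⟩
    rw [hres] at hmono
    cases b
    · have hvle : pvUnvisited parent_map v ≤ pvUnvisited parent_map vis :=
        pvUnvisited_mono parent_map vis v (fun y hy => hmono y hy)
      exact ih pid v r stk (Or.inl (by omega))
    · rw [pvMach_some]
      simp

theorem pvMach_sim (parent_map : List (Int × List Int)) (root_ids : List Int) (fuel : Nat) :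
    ∀ (pid : Int) (vis reach : PySem.Set Int) (stk : List (Int × Option (List Int))) (ret : Bool),
      pvUnvisited parent_map vis < fuel →
      pvMach parent_map root_ids ((pid, none) :: stk) ret vis reach =
        pvMach parent_map root_ids stk
          (pvCanReach parent_map root_ids fuel pid vis reach).1
          (pvCanReach parent_map root_ids fuel pid vis reach).2.1
          (pvCanReach parent_map root_ids fuel pid vis reach).2.2 := by
  induction fuel with
  | zero =>
    intro pid vis reach stk ret hfuel
    omega
  | succ f ihf =>
    intro pid vis reach stk ret hfuel
    rw [pvCanReach, pvMach_none]
    split_ifs with h1 h2 h3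
    · rfl
    · rfl
    · rfl
    · refine pvMach_sim_loop_aux parent_map root_ids f ihf _ pid _ reach stk ?_
      by_cases hmem : pid ∈ parent_map.map Prod.fst
      · refine Or.inl ?_
        have := pvUnvisited_add_lt parent_map vis pid hmem h3
        omega
      · exact Or.inr (pvGetD_mk_eq_nil parent_map pid hmem)

theorem pvStep_eq (parent_map : List (Int × List Int)) (root_ids : List Int)
    (pid : Int) (reach : PySem.Set Int) :
    (pvMach parent_map root_ids [(pid, none)] false PySem.Set.empty reach).2.2 =
      (pvCanReach parent_map root_ids (parent_map.length + 1) pid PySem.Set.empty reach).2.2 := by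
  rw [pvMach_sim parent_map root_ids (parent_map.length + 1) pid PySem.Set.empty reach [] false
    (Nat.lt_succ_of_le (pvUnvisited_empty_le parent_map))]
  rw [pvMach_nil]

-- ===== VERDICT (by name: the statement is the Claim_ definition above) =====
theorem check_reachability_from_roots_spec : Claim_equal_check_reachability_from_roots := by
  unfold Claim_equal_check_reachability_from_roots
  intro pathway_ids parent_map root_ids _
  unfold Spec_check_reachability_from_roots
  unfold check_reachability_from_roots check_reachability_from_roots_alt
  have hfold : ∀ (l : List Int) (reach : PySem.Set Int),
      l.foldl (fun reach pid =>
        (pvCanReach parent_map root_ids (parent_map.length + 1) pid PySem.Set.empty reach).2.2) reach =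
      l.foldl (fun reach start =>
        (pvMach parent_map root_ids [(start, none)] false PySem.Set.empty reach).2.2) reach := by
    intro l
    induction l with
    | nil => intro reach; rfl
    | cons a t ih =>
      intro reach
      simp only [List.foldl_cons]
      rw [pvStep_eq, ih]
  simp only [hfold]
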